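-- pv_equiv track=rewrite | github.com/bhargavaurala/accessmath-icfhr2018 | AccessMath/preprocessing/content/bbox_stability_estimator.py | compute_conflicting_groups
-- ===== SOURCE A (Python) =====
-- def compute_conflicting_groups(stable_idxs, all_overlapping_bboxes, n_groups, group_idx_per_bbox):
--     n_stable = len(stable_idxs)
--
--     # for each stable CC
--     conflicts = {group_idx:{} for group_idx in range(n_groups)}
--     for offset1 in range(n_stable):
--         bbox_idx_1 = stable_idxs[offset1]
--
--         # for every CC that occupies the same space (same group or not)..
--         for bbox_idx_2, matched_pixels, size_bbox_2, size_bbox_1 in all_overlapping_bboxes[bbox_idx_1]: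
--
--             # consider each link only once
--             if bbox_idx_1 < bbox_idx_2:
--                 # UNION - Intersection
--                 unmatched_pixels = size_bbox_1 + size_bbox_2 - matched_pixels * 2
--
--                 # check if they are on different groups
--                 group_idx1 = group_idx_per_bbox[bbox_idx_1]
--                 group_idx2 = group_idx_per_bbox[bbox_idx_2]
--                 if group_idx1 != group_idx2:
--                     # conflict found, add the total of matched pixels in the conflict
--                     if group_idx2 in conflicts[group_idx1]:
--                         conflicts[group_idx1][group_idx2]["matched"] += matched_pixels
--                         conflicts[group_idx1][group_idx2]["unmatched"] += unmatched_pixels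
--                     else:
--                         conflicts[group_idx1][group_idx2] = {
--                             "matched": matched_pixels,
--                             "unmatched": unmatched_pixels
--                         }
--
--                     if group_idx1 in conflicts[group_idx2]:
--                         conflicts[group_idx2][group_idx1]["matched"] += matched_pixels
--                         conflicts[group_idx2][group_idx1]["unmatched"] += unmatched_pixels
--                     else:
--                         conflicts[group_idx2][group_idx1] = {
--                             "matched": matched_pixels,
--                             "unmatched": unmatched_pixels
--                         }
--
--     return conflicts
-- ===== SOURCE B (Python) =====
-- def _pair_totals(events, key):
--     matched = sum(m for g1, g2, m, _u in events if (g1, g2) == key)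
--     unmatched = sum(u for g1, g2, _m, u in events if (g1, g2) == key)
--     return matched, unmatched
--
--
-- def compute_conflicting_groups(stable_idxs, all_overlapping_bboxes, n_groups, group_idx_per_bbox):
--     # stage 1: materialize the flat list of directed conflict events (no aggregation yet)
--     events = []
--     for bbox_idx_1 in stable_idxs:
--         for bbox_idx_2, matched_pixels, size_bbox_2, size_bbox_1 in all_overlapping_bboxes[bbox_idx_1]:
--             if bbox_idx_1 < bbox_idx_2:
--                 group_idx1 = group_idx_per_bbox[bbox_idx_1]
--                 group_idx2 = group_idx_per_bbox[bbox_idx_2]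
--                 if group_idx1 != group_idx2:
--                     unmatched_pixels = size_bbox_1 + size_bbox_2 - matched_pixels * 2
--                     events.append((group_idx1, group_idx2, matched_pixels, unmatched_pixels))
--                     events.append((group_idx2, group_idx1, matched_pixels, unmatched_pixels))
--
--     # stage 2: the distinct directed group pairs, in first-occurrence order
--     keys = []
--     for g1, g2, _m, _u in events:
--         if (g1, g2) not in keys:
--             keys.append((g1, g2))
--
--     # stage 3: group-by aggregation — one summing scan of the event list per distinct pair
--     conflicts = {group_idx: {} for group_idx in range(n_groups)}
--     for g1, g2 in keys:
--         matched, unmatched = _pair_totals(events, (g1, g2))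
--         conflicts[g1][g2] = {"matched": matched, "unmatched": unmatched}
--     return conflicts
-- ===== Notes on version B (the rewrite author's own statement) =====
-- stated objective: alternative
-- what changed: Replaces A's single interleaved pass that updates running sums inside the nested per-group dict with a staged group-by: first materialize the flat list of directed conflict events with no aggregation, then dedupe the directed group pairs in first-occurrence order, then fill the seeded nested dict with one summing scan of the event list per distinct pair.
import Mathlib
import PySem

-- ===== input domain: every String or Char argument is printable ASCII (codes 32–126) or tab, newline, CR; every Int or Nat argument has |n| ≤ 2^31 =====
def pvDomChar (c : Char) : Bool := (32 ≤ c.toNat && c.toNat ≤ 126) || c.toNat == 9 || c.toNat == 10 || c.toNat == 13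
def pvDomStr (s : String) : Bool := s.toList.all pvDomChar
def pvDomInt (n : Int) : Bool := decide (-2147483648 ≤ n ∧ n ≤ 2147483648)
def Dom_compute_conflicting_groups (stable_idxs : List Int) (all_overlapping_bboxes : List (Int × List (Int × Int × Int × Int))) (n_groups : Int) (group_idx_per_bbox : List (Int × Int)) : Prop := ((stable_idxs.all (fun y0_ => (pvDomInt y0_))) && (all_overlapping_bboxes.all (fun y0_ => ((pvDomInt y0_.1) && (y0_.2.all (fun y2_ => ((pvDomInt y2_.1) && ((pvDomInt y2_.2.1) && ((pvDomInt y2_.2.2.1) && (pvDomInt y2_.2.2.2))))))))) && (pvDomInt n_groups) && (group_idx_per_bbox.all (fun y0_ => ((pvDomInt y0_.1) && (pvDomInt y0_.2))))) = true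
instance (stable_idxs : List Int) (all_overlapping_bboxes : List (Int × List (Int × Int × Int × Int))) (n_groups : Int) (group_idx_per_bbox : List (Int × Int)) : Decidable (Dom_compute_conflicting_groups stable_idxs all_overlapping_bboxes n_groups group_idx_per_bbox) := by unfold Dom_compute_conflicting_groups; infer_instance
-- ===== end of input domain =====

-- B replaces A's single interleaved pass (running sums updated inside the nested dict) with a staged
-- group-by: materialize the flat event list, dedupe the directed group pairs in first-occurrence
-- order, then fill the seeded nested dict with one summing scan per distinct pair (alternative, not faster).

-- ===== PORT A =====
-- the dict comprehension `{group_idx: {} for group_idx in range(n_groups)}` (identical line in A and B)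
def pvSeed (n_groups : Int) : PySem.Dict Int (PySem.Dict Int (PySem.Dict String Int)) :=
  (PySem.List.pyRange 0 n_groups 1).foldl (fun c g => c.insert g PySem.Dict.empty) PySem.Dict.empty

-- the repeated `if group_idx2 in conflicts[group_idx1]: … += … else: conflicts[group_idx1][group_idx2] = {…}` block of A
def pvAddConflict (c : PySem.Dict Int (PySem.Dict Int (PySem.Dict String Int))) (g1 g2 m u : Int) :
    PySem.Dict Int (PySem.Dict Int (PySem.Dict String Int)) :=
  match (c.getD g1 PySem.Dict.empty).get? g2 with
  | some e =>
      c.insert g1 ((c.getD g1 PySem.Dict.empty).insert g2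
        ((e.insert "matched" (e.getD "matched" 0 + m)).insert "unmatched" (e.getD "unmatched" 0 + u)))
  | none =>
      c.insert g1 ((c.getD g1 PySem.Dict.empty).insert g2 (PySem.Dict.ofList [("matched", m), ("unmatched", u)]))

-- A's inner `for bbox_idx_2, matched_pixels, size_bbox_2, size_bbox_1 in all_overlapping_bboxes[bbox_idx_1]` loop
def pvInnerA (aobD : PySem.Dict Int (List (Int × Int × Int × Int))) (gD : PySem.Dict Int Int)
    (c : PySem.Dict Int (PySem.Dict Int (PySem.Dict String Int))) (b1 : Int) :
    PySem.Dict Int (PySem.Dict Int (PySem.Dict String Int)) :=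
  (aobD.getD b1 []).foldl (fun c r =>
    if b1 < r.1 then
      let u := r.2.2.2 + r.2.2.1 - r.2.1 * 2
      let g1 := gD.getD b1 0
      let g2 := gD.getD r.1 0
      if g1 ≠ g2 then pvAddConflict (pvAddConflict c g1 g2 r.2.1 u) g2 g1 r.2.1 u else c
    else c) c

def compute_conflicting_groups (stable_idxs : List Int) (all_overlapping_bboxes : List (Int × List (Int × Int × Int × Int))) (n_groups : Int) (group_idx_per_bbox : List (Int × Int)) : List (Int × List (Int × List (String × Int))) :=
  let aobD := PySem.Dict.ofList all_overlapping_bboxes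
  let gD := PySem.Dict.ofList group_idx_per_bbox
  let n_stable := PySem.List.len stable_idxs
  let conflicts := (PySem.List.pyRange 0 n_stable 1).foldl
    (fun c offset1 => pvInnerA aobD gD c (PySem.List.pyGetD stable_idxs offset1 0)) (pvSeed n_groups)
  conflicts.items.map (fun p => (p.1, p.2.items.map (fun q => (q.1, q.2.items))))

-- ===== PORT B =====
-- Source B stage 1 inner loop: `events.append(…); events.append(…)` for each conflicting link
def pvCollect (aobD : PySem.Dict Int (List (Int × Int × Int × Int))) (gD : PySem.Dict Int Int)
    (events : List (Int × Int × Int × Int)) (b1 : Int) : List (Int × Int × Int × Int) :=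
  (aobD.getD b1 []).foldl (fun ev r =>
    if b1 < r.1 then
      let g1 := gD.getD b1 0
      let g2 := gD.getD r.1 0
      if g1 ≠ g2 then
        let u := r.2.2.2 + r.2.2.1 - r.2.1 * 2
        ev ++ [(g1, g2, r.2.1, u), (g2, g1, r.2.1, u)]
      else ev
    else ev) events

-- Source B stage 2: `if (g1, g2) not in keys: keys.append((g1, g2))`
def pvKeys (events : List (Int × Int × Int × Int)) : List (Int × Int) :=
  events.foldl (fun ks e => if (e.1, e.2.1) ∈ ks then ks else ks ++ [(e.1, e.2.1)]) []

-- Source B `_pair_totals(events, key)`: the two generator sums over the event list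
def pvPairTotals (events : List (Int × Int × Int × Int)) (key : Int × Int) : Int × Int :=
  (events.foldl (fun s e => if (e.1, e.2.1) = key then s + e.2.2.1 else s) 0,
   events.foldl (fun s e => if (e.1, e.2.1) = key then s + e.2.2.2 else s) 0)

def compute_conflicting_groups_alt (stable_idxs : List Int) (all_overlapping_bboxes : List (Int × List (Int × Int × Int × Int))) (n_groups : Int) (group_idx_per_bbox : List (Int × Int)) : List (Int × List (Int × List (String × Int))) :=
  let aobD := PySem.Dict.ofList all_overlapping_bboxes
  let gD := PySem.Dict.ofList group_idx_per_bbox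
  let events := stable_idxs.foldl (pvCollect aobD gD) []
  let keys := pvKeys events
  let conflicts := keys.foldl (fun c k =>
    let t := pvPairTotals events k
    c.insert k.1 ((c.getD k.1 PySem.Dict.empty).insert k.2
      (PySem.Dict.ofList [("matched", t.1), ("unmatched", t.2)]))) (pvSeed n_groups)
  conflicts.items.map (fun p => (p.1, p.2.items.map (fun q => (q.1, q.2.items))))

-- ===== PRECONDITION & SPEC =====
-- Pre_ excludes exactly the inputs on which Python A raises a KeyError: a stable index missing from
-- all_overlapping_bboxes, a bbox of a considered link missing from group_idx_per_bbox, or a conflicting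
-- link whose two (distinct) group indices are not both in range(n_groups).
def Pre_compute_conflicting_groups (stable_idxs : List Int) (all_overlapping_bboxes : List (Int × List (Int × Int × Int × Int))) (n_groups : Int) (group_idx_per_bbox : List (Int × Int)) : Prop :=
  (stable_idxs.all (fun b1 =>
    (PySem.Dict.ofList all_overlapping_bboxes).contains b1 &&
    ((PySem.Dict.ofList all_overlapping_bboxes).getD b1 []).all (fun r =>
      !(decide (b1 < r.1)) ||
      ((PySem.Dict.ofList group_idx_per_bbox).contains b1 &&
       (PySem.Dict.ofList group_idx_per_bbox).contains r.1 &&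
       (decide ((PySem.Dict.ofList group_idx_per_bbox).getD b1 0 = (PySem.Dict.ofList group_idx_per_bbox).getD r.1 0) ||
        (decide (0 ≤ (PySem.Dict.ofList group_idx_per_bbox).getD b1 0) &&
         decide ((PySem.Dict.ofList group_idx_per_bbox).getD b1 0 < n_groups) &&
         decide (0 ≤ (PySem.Dict.ofList group_idx_per_bbox).getD r.1 0) &&
         decide ((PySem.Dict.ofList group_idx_per_bbox).getD r.1 0 < n_groups))))))) = true
instance (stable_idxs : List Int) (all_overlapping_bboxes : List (Int × List (Int × Int × Int × Int))) (n_groups : Int) (group_idx_per_bbox : List (Int × Int)) : Decidable (Pre_compute_conflicting_groups stable_idxs all_overlapping_bboxes n_groups group_idx_per_bbox) := by unfold Pre_compute_conflicting_groups; infer_instance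

def pvWitness_compute_conflicting_groups : List Int × (List (Int × List (Int × Int × Int × Int))) × Int × (List (Int × Int)) :=
  ([0], [(0, [(1, 3, 5, 4)])], 2, [(0, 0), (1, 1)])

def Spec_compute_conflicting_groups (stable_idxs : List Int) (all_overlapping_bboxes : List (Int × List (Int × Int × Int × Int))) (n_groups : Int) (group_idx_per_bbox : List (Int × Int)) (out : List (Int × List (Int × List (String × Int)))) : Prop := out = compute_conflicting_groups_alt stable_idxs all_overlapping_bboxes n_groups group_idx_per_bbox
instance (stable_idxs : List Int) (all_overlapping_bboxes : List (Int × List (Int × Int × Int × Int))) (n_groups : Int) (group_idx_per_bbox : List (Int × Int)) (out : List (Int × List (Int × List (String × Int)))) : Decidable (Spec_compute_conflicting_groups stable_idxs all_overlapping_bboxes n_groups group_idx_per_bbox out) := by unfold Spec_compute_conflicting_groups; infer_instance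

-- ===== CLAIM (what is proved, stated in full; the proofs are below) =====
def Claim_equal_compute_conflicting_groups : Prop := ∀ (stable_idxs : List Int) (all_overlapping_bboxes : List (Int × List (Int × Int × Int × Int))) (n_groups : Int) (group_idx_per_bbox : List (Int × Int)), Dom_compute_conflicting_groups stable_idxs all_overlapping_bboxes n_groups group_idx_per_bbox → Pre_compute_conflicting_groups stable_idxs all_overlapping_bboxes n_groups group_idx_per_bbox → Spec_compute_conflicting_groups stable_idxs all_overlapping_bboxes n_groups group_idx_per_bbox (compute_conflicting_groups stable_idxs all_overlapping_bboxes n_groups group_idx_per_bbox)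

-- ===== LEMMAS AND PROOFS =====

-- the directed conflict events generated (in order) by the common double loop of A and B
def pvEvents (aobD : PySem.Dict Int (List (Int × Int × Int × Int))) (gD : PySem.Dict Int Int)
    (stable_idxs : List Int) : List (Int × Int × Int × Int) :=
  stable_idxs.flatMap (fun b1 =>
    (aobD.getD b1 []).flatMap (fun r =>
      if b1 < r.1 ∧ gD.getD b1 0 ≠ gD.getD r.1 0 then
        [(gD.getD b1 0, gD.getD r.1 0, r.2.1, r.2.2.2 + r.2.2.1 - r.2.1 * 2),
         (gD.getD r.1 0, gD.getD b1 0, r.2.1, r.2.2.2 + r.2.2.1 - r.2.1 * 2)]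
      else []))

def pvStepA (c : PySem.Dict Int (PySem.Dict Int (PySem.Dict String Int))) (e : Int × Int × Int × Int) :
    PySem.Dict Int (PySem.Dict Int (PySem.Dict String Int)) := pvAddConflict c e.1 e.2.1 e.2.2.1 e.2.2.2

def pvStepB (f : PySem.Dict (Int × Int) (Int × Int)) (e : Int × Int × Int × Int) :
    PySem.Dict (Int × Int) (Int × Int) :=
  f.insert (e.1, e.2.1) ((f.getD (e.1, e.2.1) (0, 0)).1 + e.2.2.1, (f.getD (e.1, e.2.1) (0, 0)).2 + e.2.2.2)

def pvMkE (v : Int × Int) : PySem.Dict String Int :=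
  PySem.Dict.ofList [("matched", v.1), ("unmatched", v.2)]

-- the inner dict of group g that a flat accumulator denotes
def pvInnerFor (g : Int) (flat : PySem.Dict (Int × Int) (Int × Int)) : PySem.Dict Int (PySem.Dict String Int) :=
  PySem.Dict.mk ((flat.items.filter (fun p => p.1.1 == g)).map (fun p => (p.1.2, pvMkE p.2)))

def pvMkform (n : Int) (flat : PySem.Dict (Int × Int) (Int × Int)) :
    PySem.Dict Int (PySem.Dict Int (PySem.Dict String Int)) :=
  PySem.Dict.mk ((PySem.List.pyRange 0 n 1).map (fun g => (g, pvInnerFor g flat)))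

-- previous-attempt pass-2 shape, now a proof-side bridge: fold the flat items into the seeded nested dict
def pvPass2 (n_groups : Int) (flat : PySem.Dict (Int × Int) (Int × Int)) :
    PySem.Dict Int (PySem.Dict Int (PySem.Dict String Int)) :=
  flat.items.foldl (fun c kv =>
    c.insert kv.1.1 ((c.getD kv.1.1 PySem.Dict.empty).insert kv.1.2
      (PySem.Dict.ofList [("matched", kv.2.1), ("unmatched", kv.2.2)]))) (pvSeed n_groups)

-- generic fold fusion
theorem pv_foldl_flatMap {α β σ : Type} (h : α → List β) (f : σ → β → σ) (l : List α) (s : σ) :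
    (l.flatMap h).foldl f s = l.foldl (fun s a => (h a).foldl f s) s := by
  induction l generalizing s with
  | nil => rfl
  | cons a l ih => simp [List.flatMap_cons, List.foldl_append, ih]

theorem pvInnerA_eq (aobD : PySem.Dict Int (List (Int × Int × Int × Int))) (gD : PySem.Dict Int Int)
    (c : PySem.Dict Int (PySem.Dict Int (PySem.Dict String Int))) (b1 : Int) :
    pvInnerA aobD gD c b1 =
      ((aobD.getD b1 []).flatMap (fun r =>
        if b1 < r.1 ∧ gD.getD b1 0 ≠ gD.getD r.1 0 then
          [(gD.getD b1 0, gD.getD r.1 0, r.2.1, r.2.2.2 + r.2.2.1 - r.2.1 * 2),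
           (gD.getD r.1 0, gD.getD b1 0, r.2.1, r.2.2.2 + r.2.2.1 - r.2.1 * 2)]
        else [])).foldl pvStepA c := by
  unfold pvInnerA
  generalize aobD.getD b1 [] = l
  induction l generalizing c with
  | nil => rfl
  | cons r l ih =>
      rw [List.foldl_cons, List.flatMap_cons, List.foldl_append, ih]
      congr 1
      by_cases hb : b1 < r.1
      · by_cases hg : gD.getD b1 0 ≠ gD.getD r.1 0
        · simp [hb, hg, pvStepA, pvAddConflict]
        · simp [hb, hg]
      · simp [hb]

-- B's stage-1 collection loop produces exactly the event list
theorem pvCollect_eq (aobD : PySem.Dict Int (List (Int × Int × Int × Int))) (gD : PySem.Dict Int Int)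
    (ev : List (Int × Int × Int × Int)) (b1 : Int) :
    pvCollect aobD gD ev b1 =
      ev ++ (aobD.getD b1 []).flatMap (fun r =>
        if b1 < r.1 ∧ gD.getD b1 0 ≠ gD.getD r.1 0 then
          [(gD.getD b1 0, gD.getD r.1 0, r.2.1, r.2.2.2 + r.2.2.1 - r.2.1 * 2),
           (gD.getD r.1 0, gD.getD b1 0, r.2.1, r.2.2.2 + r.2.2.1 - r.2.1 * 2)]
        else []) := by
  unfold pvCollect
  generalize aobD.getD b1 [] = l
  induction l generalizing ev with
  | nil => simp
  | cons r l ih =>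
      rw [List.foldl_cons, List.flatMap_cons, ih, ← List.append_assoc]
      congr 1
      by_cases hb : b1 < r.1
      · by_cases hg : gD.getD b1 0 ≠ gD.getD r.1 0
        · simp [hb, hg]
        · simp [hb, hg]
      · simp [hb]

theorem pvEventsB_eq (aobD : PySem.Dict Int (List (Int × Int × Int × Int))) (gD : PySem.Dict Int Int)
    (stable_idxs : List Int) :
    stable_idxs.foldl (pvCollect aobD gD) [] = pvEvents aobD gD stable_idxs := by
  unfold pvEvents
  induction stable_idxs using List.reverseRecOn with
  | nil => rfl
  | append_singleton l b1 ih =>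
      rw [List.foldl_append, List.foldl_cons, List.foldl_nil, List.flatMap_append, ih,
        List.flatMap_cons, List.flatMap_nil, List.append_nil, pvCollect_eq]

-- membership in the dedup key list = some event carries that directed pair
theorem pvMem_keys_aux (E : List (Int × Int × Int × Int)) :
    ∀ (acc : List (Int × Int)) (k : Int × Int),
      (k ∈ E.foldl (fun ks e => if (e.1, e.2.1) ∈ ks then ks else ks ++ [(e.1, e.2.1)]) acc) ↔
        (k ∈ acc ∨ ∃ e ∈ E, (e.1, e.2.1) = k) := by
  induction E with
  | nil => intro acc k; simp
  | cons e E ih =>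
      intro acc k
      rw [List.foldl_cons]
      by_cases h : (e.1, e.2.1) ∈ acc
      · rw [if_pos h, ih]
        constructor
        · rintro (hk | hk)
          · exact Or.inl hk
          · exact Or.inr ⟨hk.choose, List.mem_cons_of_mem _ hk.choose_spec.1, hk.choose_spec.2⟩
        · rintro (hk | ⟨e', he', hk⟩)
          · exact Or.inl hk
          · rcases List.mem_cons.mp he' with rfl | he'
            · exact Or.inl (hk ▸ h)
            · exact Or.inr ⟨e', he', hk⟩
      · rw [if_neg h, ih]
        constructor
        · rintro (hk | hk)
          · rcases List.mem_append.mp hk with hk | hk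
            · exact Or.inl hk
            · exact Or.inr ⟨e, List.mem_cons_self, (List.mem_singleton.mp hk).symm⟩
          · exact Or.inr ⟨hk.choose, List.mem_cons_of_mem _ hk.choose_spec.1, hk.choose_spec.2⟩
        · rintro (hk | ⟨e', he', hk⟩)
          · exact Or.inl (List.mem_append_left _ hk)
          · rcases List.mem_cons.mp he' with rfl | he'
            · exact Or.inl (List.mem_append_right _ (hk ▸ List.mem_singleton_self _))
            · exact Or.inr ⟨e', he', hk⟩

theorem pvMem_keys (E : List (Int × Int × Int × Int)) (k : Int × Int) :
    k ∈ pvKeys E ↔ ∃ e ∈ E, (e.1, e.2.1) = k := by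
  unfold pvKeys; rw [pvMem_keys_aux]; simp

theorem pvKeys_append (E : List (Int × Int × Int × Int)) (e : Int × Int × Int × Int) :
    pvKeys (E ++ [e]) =
      if (e.1, e.2.1) ∈ pvKeys E then pvKeys E else pvKeys E ++ [(e.1, e.2.1)] := by
  unfold pvKeys
  rw [List.foldl_append, List.foldl_cons, List.foldl_nil]

theorem pvTotals_append (E : List (Int × Int × Int × Int)) (e : Int × Int × Int × Int) (k : Int × Int) :
    pvPairTotals (E ++ [e]) k =
      if (e.1, e.2.1) = k then ((pvPairTotals E k).1 + e.2.2.1, (pvPairTotals E k).2 + e.2.2.2)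
      else pvPairTotals E k := by
  unfold pvPairTotals
  rw [List.foldl_append, List.foldl_append, List.foldl_cons, List.foldl_cons,
    List.foldl_nil, List.foldl_nil]
  by_cases h : (e.1, e.2.1) = k
  · simp [h]
  · simp [h]

theorem pvTotals_zero (E : List (Int × Int × Int × Int)) (k : Int × Int)
    (h : ∀ e ∈ E, (e.1, e.2.1) ≠ k) : pvPairTotals E k = (0, 0) := by
  unfold pvPairTotals
  induction E using List.reverseRecOn with
  | nil => rfl
  | append_singleton E e ih =>
      have he : (e.1, e.2.1) ≠ k := h e (List.mem_append_right _ (List.mem_singleton_self _))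
      rw [List.foldl_append, List.foldl_append, List.foldl_cons, List.foldl_cons,
        List.foldl_nil, List.foldl_nil, if_neg he, if_neg he]
      exact ih (fun e' he' => h e' (List.mem_append_left _ he'))

-- lookup in a dict whose items are keys mapped through a value function
theorem pvGetMapped (keys : List (Int × Int)) (v : (Int × Int) → Int × Int) (k : Int × Int) :
    (PySem.Dict.mk (keys.map (fun k' => (k', v k')))).get? k =
      if k ∈ keys then some (v k) else none := by
  induction keys with
  | nil => simp [PySem.Dict.get?]
  | cons k0 keys ih =>
      rw [List.map_cons, PySem.Dict.get?_mk_cons, ih]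
      by_cases h : k0 = k
      · simp [h]
      · have h' : ¬ (k = k0) := fun hh => h hh.symm
        simp [h, h']

-- THE group-by characterization: the flat accumulation fold's items = dedup keys zipped with totals
theorem pvFlatItems (E : List (Int × Int × Int × Int)) :
    (E.foldl pvStepB PySem.Dict.empty).items =
      (pvKeys E).map (fun k => (k, pvPairTotals E k)) := by
  induction E using List.reverseRecOn with
  | nil => rfl
  | append_singleton E e ih =>
      rw [List.foldl_append, List.foldl_cons, List.foldl_nil]
      set F := E.foldl pvStepB PySem.Dict.empty with hFdef
      have hF : F = PySem.Dict.mk ((pvKeys E).map (fun k => (k, pvPairTotals E k))) := by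
        apply PySem.Dict.ext
        rw [ih]
      have hget : F.get? (e.1, e.2.1) =
          if (e.1, e.2.1) ∈ pvKeys E then some (pvPairTotals E (e.1, e.2.1)) else none := by
        rw [hF]; exact pvGetMapped _ _ _
      by_cases hmem : (e.1, e.2.1) ∈ pvKeys E
      · have hget' : F.get? (e.1, e.2.1) = some (pvPairTotals E (e.1, e.2.1)) := by
          rw [hget, if_pos hmem]
        have hcont : F.contains (e.1, e.2.1) = true := by
          rw [PySem.Dict.contains_eq_isSome_get?, hget']; rfl
        have hgd : F.getD (e.1, e.2.1) (0, 0) = pvPairTotals E (e.1, e.2.1) :=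
          PySem.Dict.getD_of_get?_eq_some _ _ hget'
        show (F.insert (e.1, e.2.1) _).items = _
        rw [PySem.Dict.items_insert_of_contains _ _ hcont, ih, pvKeys_append, if_pos hmem,
          List.map_map]
        apply List.map_congr_left
        intro k _
        by_cases hk : k = (e.1, e.2.1)
        · subst hk
          simp [pvTotals_append, hgd]
        · have hk' : ¬ ((e.1, e.2.1) = k) := fun h => hk h.symm
          simp [Function.comp_apply, hk, hk', pvTotals_append]
      · have hget' : F.get? (e.1, e.2.1) = none := by rw [hget, if_neg hmem]
        have hcont : F.contains (e.1, e.2.1) = false := by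
          rw [PySem.Dict.contains_eq_isSome_get?, hget']; rfl
        have hgd : F.getD (e.1, e.2.1) (0, 0) = (0, 0) :=
          PySem.Dict.getD_of_get?_eq_none _ _ hget'
        have hz : pvPairTotals E (e.1, e.2.1) = (0, 0) := by
          apply pvTotals_zero
          intro e' he' hk
          exact hmem ((pvMem_keys E _).mpr ⟨e', he', hk⟩)
        show (F.insert (e.1, e.2.1) _).items = _
        rw [PySem.Dict.items_insert_of_not_contains _ _ hcont, ih, pvKeys_append, if_neg hmem,
          List.map_append]
        congr 1
        · apply List.map_congr_left
          intro k hk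
          have hk' : ¬ ((e.1, e.2.1) = k) := by
            intro h; exact hmem (h ▸ hk)
          simp [pvTotals_append, hk']
        · simp [pvTotals_append, hgd, hz]

-- lookup in the denoted inner dict = lookup in the flat dict
theorem pvInnerFor_get? (g h : Int) (flat : PySem.Dict (Int × Int) (Int × Int)) :
    (pvInnerFor g flat).get? h = (flat.get? (g, h)).map pvMkE := by
  rcases flat with ⟨l⟩
  induction l with
  | nil => rfl
  | cons kv l ih =>
      obtain ⟨⟨k1, k2⟩, v⟩ := kv
      by_cases h1 : k1 = g
      · subst h1
        by_cases h2 : k2 = h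
        · subst h2
          simp [pvInnerFor, PySem.Dict.get?_mk_cons]
        · simpa [pvInnerFor, PySem.Dict.get?_mk_cons, h2] using ih
      · have h3 : ¬ ((k1, k2) = (g, h)) := by simp [h1]
        simpa [pvInnerFor, PySem.Dict.get?_mk_cons, h1, h3] using ih

-- updating an existing outer key of the range-shaped nested dict rewrites it in place
theorem pvMk_insert (n g1 : Int) (f : Int → PySem.Dict Int (PySem.Dict String Int))
    (w : PySem.Dict Int (PySem.Dict String Int)) (h0 : 0 ≤ g1) (h1 : g1 < n) :
    (PySem.Dict.mk ((PySem.List.pyRange 0 n 1).map (fun g => (g, f g)))).insert g1 w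
      = PySem.Dict.mk ((PySem.List.pyRange 0 n 1).map (fun g => (g, if g = g1 then w else f g))) := by
  have hmem : g1 ∈ PySem.List.pyRange 0 n 1 := by
    rw [PySem.List.mem_pyRange_one]; exact ⟨h0, h1⟩
  have hcont : (PySem.Dict.mk ((PySem.List.pyRange 0 n 1).map (fun g => (g, f g)))).contains g1 = true := by
    apply (PySem.Dict.contains_iff_mem_keys _ _).mpr
    show g1 ∈ ((PySem.List.pyRange 0 n 1).map (fun g => (g, f g))).map (·.1)
    exact List.mem_map_of_mem (List.mem_map_of_mem hmem)
  apply PySem.Dict.ext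
  rw [PySem.Dict.items_insert_of_contains _ w hcont]
  show (((PySem.List.pyRange 0 n 1).map (fun g => (g, f g))).map
      (fun p => if p.1 == g1 then (g1, w) else p)) = _
  rw [List.map_map]
  apply List.map_congr_left
  intro g _
  by_cases hg : g = g1
  · simp [hg]
  · simp [hg]

theorem pvMk_getD (n g1 : Int) (f : Int → PySem.Dict Int (PySem.Dict String Int))
    (dflt : PySem.Dict Int (PySem.Dict String Int)) (h0 : 0 ≤ g1) (h1 : g1 < n) :
    (PySem.Dict.mk ((PySem.List.pyRange 0 n 1).map (fun g => (g, f g)))).getD g1 dflt = f g1 := by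
  have hmem : g1 ∈ PySem.List.pyRange 0 n 1 := by
    rw [PySem.List.mem_pyRange_one]; exact ⟨h0, h1⟩
  apply PySem.Dict.getD_of_mem_items
  · show (g1, f g1) ∈ (PySem.List.pyRange 0 n 1).map (fun g => (g, f g))
    exact List.mem_map_of_mem hmem
  · show (((PySem.List.pyRange 0 n 1).map (fun g => (g, f g))).map (·.1)).Nodup
    rw [List.map_map]
    show ((PySem.List.pyRange 0 n 1).map (fun g => g)).Nodup
    rw [List.map_id']
    exact PySem.List.nodup_pyRange_one 0 n

-- replacing the value of one flat key does not change other groups' filtered items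
theorem pvFilter_repl_ne (k : Int × Int) (nv : Int × Int) (g : Int) (hk : k.1 ≠ g)
    (l : List ((Int × Int) × (Int × Int))) :
    ((l.map (fun p => if p.1 == k then (k, nv) else p)).filter (fun p => p.1.1 == g))
      = l.filter (fun p => p.1.1 == g) := by
  simp only [beq_iff_eq]
  induction l with
  | nil => rfl
  | cons p l ih =>
      by_cases hp : p.1 = k
      · simp [hp, hk, ih]
      · by_cases hg : p.1.1 = g
        · simp [hp, hg, ih]
        · simp [hp, hg, ih]

-- replacing the value of flat key k rewrites group k.1's filtered items at inner key k.2
theorem pvFilter_repl_eq (k : Int × Int) (nv : Int × Int)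
    (l : List ((Int × Int) × (Int × Int))) :
    (((l.map (fun p => if p.1 == k then (k, nv) else p)).filter (fun p => p.1.1 == k.1)).map
        (fun p => (p.1.2, pvMkE p.2)))
      = ((l.filter (fun p => p.1.1 == k.1)).map (fun p => (p.1.2, pvMkE p.2))).map
          (fun q => if q.1 == k.2 then (k.2, pvMkE nv) else q) := by
  simp only [beq_iff_eq]
  induction l with
  | nil => rfl
  | cons p l ih =>
      by_cases hp : p.1 = k
      · simp [hp, ih]
      · have hne : ¬ (p.1.1 = k.1 ∧ p.1.2 = k.2) := by
          rintro ⟨e1, e2⟩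
          exact hp (Prod.ext e1 e2)
        by_cases hg : p.1.1 = k.1
        · have h2 : ¬ (p.1.2 = k.2) := fun h => hne ⟨hg, h⟩
          simp [hp, hg, h2, ih]
        · simp [hp, hg, ih]

-- the one-step commutation: one directed update on the flat dict vs on the nested dict
theorem pvStep_comm (n : Int) (flat : PySem.Dict (Int × Int) (Int × Int)) (e : Int × Int × Int × Int)
    (h0 : 0 ≤ e.1) (h1 : e.1 < n) :
    pvStepA (pvMkform n flat) e = pvMkform n (pvStepB flat e) := by
  obtain ⟨g1, g2, m, u⟩ := e
  simp only at h0 h1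
  show pvAddConflict (pvMkform n flat) g1 g2 m u = pvMkform n
    (flat.insert (g1, g2) ((flat.getD (g1, g2) (0, 0)).1 + m, (flat.getD (g1, g2) (0, 0)).2 + u))
  have hgetD : (pvMkform n flat).getD g1 PySem.Dict.empty = pvInnerFor g1 flat :=
    pvMk_getD n g1 (fun g => pvInnerFor g flat) _ h0 h1
  cases hget : flat.get? (g1, g2) with
  | some v =>
      obtain ⟨a, b⟩ := v
      have hcontf : flat.contains (g1, g2) = true := by
        rw [PySem.Dict.contains_eq_isSome_get?, hget]; rfl
      have hgetI : (pvInnerFor g1 flat).get? g2 = some (pvMkE (a, b)) := by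
        rw [pvInnerFor_get?, hget]; rfl
      have hcontI : (pvInnerFor g1 flat).contains g2 = true := by
        rw [PySem.Dict.contains_eq_isSome_get?, hgetI]; rfl
      have hbump : flat.insert (g1, g2) ((flat.getD (g1, g2) (0, 0)).1 + m, (flat.getD (g1, g2) (0, 0)).2 + u)
          = flat.insert (g1, g2) (a + m, b + u) := by
        rw [PySem.Dict.getD_of_get?_eq_some _ _ hget]
      have hstep : pvAddConflict (pvMkform n flat) g1 g2 m u
          = (pvMkform n flat).insert g1 ((pvInnerFor g1 flat).insert g2 (pvMkE (a + m, b + u))) := by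
        unfold pvAddConflict
        rw [hgetD, hgetI]
        rfl
      rw [hstep, hbump]
      unfold pvMkform
      rw [pvMk_insert n g1 (fun g => pvInnerFor g flat) _ h0 h1]
      congr 1
      apply List.map_congr_left
      intro g _
      by_cases hg : g = g1
      · subst hg
        rw [if_pos rfl]
        congr 1
        apply PySem.Dict.ext
        rw [PySem.Dict.items_insert_of_contains _ _ hcontI]
        show ((pvInnerFor g flat).items.map (fun q => if q.1 == g2 then (g2, pvMkE (a + m, b + u)) else q)) = _
        unfold pvInnerFor
        rw [PySem.Dict.items_insert_of_contains _ _ hcontf]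
        exact (pvFilter_repl_eq (g, g2) (a + m, b + u) flat.items).symm
      · simp only [if_neg hg]
        congr 1
        unfold pvInnerFor
        rw [PySem.Dict.items_insert_of_contains _ _ hcontf]
        rw [pvFilter_repl_ne (g1, g2) (a + m, b + u) g (fun h => hg h.symm) flat.items]
  | none =>
      have hcontf : flat.contains (g1, g2) = false := by
        rw [PySem.Dict.contains_eq_isSome_get?, hget]; rfl
      have hgetI : (pvInnerFor g1 flat).get? g2 = none := by
        rw [pvInnerFor_get?, hget]; rfl
      have hcontI : (pvInnerFor g1 flat).contains g2 = false := by
        rw [PySem.Dict.contains_eq_isSome_get?, hgetI]; rfl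
      have hbump : flat.insert (g1, g2) ((flat.getD (g1, g2) (0, 0)).1 + m, (flat.getD (g1, g2) (0, 0)).2 + u)
          = flat.insert (g1, g2) (m, u) := by
        rw [PySem.Dict.getD_of_get?_eq_none _ _ hget]
        norm_num
      have hstep : pvAddConflict (pvMkform n flat) g1 g2 m u
          = (pvMkform n flat).insert g1 ((pvInnerFor g1 flat).insert g2 (pvMkE (m, u))) := by
        unfold pvAddConflict
        rw [hgetD, hgetI]
        rfl
      rw [hstep, hbump]
      unfold pvMkform
      rw [pvMk_insert n g1 (fun g => pvInnerFor g flat) _ h0 h1]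
      congr 1
      apply List.map_congr_left
      intro g _
      by_cases hg : g = g1
      · subst hg
        rw [if_pos rfl]
        congr 1
        apply PySem.Dict.ext
        rw [PySem.Dict.items_insert_of_not_contains _ _ hcontI]
        show (pvInnerFor g flat).items ++ [(g2, pvMkE (m, u))] = _
        unfold pvInnerFor
        rw [PySem.Dict.items_insert_of_not_contains _ _ hcontf]
        simp [List.filter_append, pvMkE]
      · simp only [if_neg hg]
        congr 1
        unfold pvInnerFor
        rw [PySem.Dict.items_insert_of_not_contains _ _ hcontf]
        have hne : g1 ≠ g := fun h => hg h.symm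
        simp [List.filter_append, hne]

theorem pvMain (n : Int) (D : List (Int × Int × Int × Int)) (flat : PySem.Dict (Int × Int) (Int × Int))
    (hD : ∀ e ∈ D, 0 ≤ e.1 ∧ e.1 < n) :
    D.foldl pvStepA (pvMkform n flat) = pvMkform n (D.foldl pvStepB flat) := by
  induction D generalizing flat with
  | nil => rfl
  | cons e D ih =>
      have he := hD e (by simp)
      simp only [List.foldl_cons, pvStep_comm n flat e he.1 he.2]
      exact ih _ (fun e' h' => hD e' (by simp [h']))

theorem pvSeed_eq (n : Int) : pvSeed n = pvMkform n PySem.Dict.empty := by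
  apply PySem.Dict.ext
  unfold pvSeed pvMkform
  rw [PySem.Dict.items_foldl_insert_fresh]
  · simp [pvInnerFor, PySem.Dict.empty]
  · intro a _
    exact PySem.Dict.contains_empty a
  · simpa using PySem.List.nodup_pyRange_one 0 n

-- the pass-2 fold from a range-shaped nested dict, characterized pointwise per group
theorem pvPass2_gen (n : Int) (l : List ((Int × Int) × (Int × Int))) :
    ∀ (f : Int → PySem.Dict Int (PySem.Dict String Int)),
    (∀ p ∈ l, 0 ≤ p.1.1 ∧ p.1.1 < n) →
    l.foldl (fun c kv =>
        c.insert kv.1.1 ((c.getD kv.1.1 PySem.Dict.empty).insert kv.1.2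
          (PySem.Dict.ofList [("matched", kv.2.1), ("unmatched", kv.2.2)])))
      (PySem.Dict.mk ((PySem.List.pyRange 0 n 1).map (fun g => (g, f g))))
      = PySem.Dict.mk ((PySem.List.pyRange 0 n 1).map (fun g =>
          (g, l.foldl (fun d p => if p.1.1 = g then d.insert p.1.2 (pvMkE p.2) else d) (f g)))) := by
  induction l with
  | nil => intro f _; rfl
  | cons p l ih =>
      intro f hl
      have hp := hl p (by simp)
      rw [List.foldl_cons,
        pvMk_getD n p.1.1 f PySem.Dict.empty hp.1 hp.2,
        pvMk_insert n p.1.1 f _ hp.1 hp.2,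
        ih (fun g => if g = p.1.1 then
              (f p.1.1).insert p.1.2
                (PySem.Dict.ofList [("matched", p.2.1), ("unmatched", p.2.2)])
            else f g)
          (fun q hq => hl q (List.mem_cons_of_mem _ hq))]
      congr 1
      apply List.map_congr_left
      intro g _
      by_cases hgp : g = p.1.1
      · subst hgp
        simp [pvMkE]
      · have hgp' : ¬ p.1.1 = g := fun h => hgp h.symm
        simp [hgp, hgp']

-- restricting the per-group fold to the matching items
theorem pvFoldIf (g : Int) (l : List ((Int × Int) × (Int × Int))) :
    ∀ (d : PySem.Dict Int (PySem.Dict String Int)),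
      l.foldl (fun d p => if p.1.1 = g then d.insert p.1.2 (pvMkE p.2) else d) d
      = (l.filter (fun p => p.1.1 == g)).foldl (fun d p => d.insert p.1.2 (pvMkE p.2)) d := by
  induction l with
  | nil => intro d; rfl
  | cons p l ih =>
      intro d
      by_cases hg : p.1.1 = g
      · simp [hg, ih]
      · simp [hg, ih]

-- distinct flat keys give distinct inner keys within one group
theorem pvNodupFiltered (g : Int) (l : List ((Int × Int) × (Int × Int)))
    (h : (l.map (·.1)).Nodup) :
    ((l.filter (fun p => p.1.1 == g)).map (fun p => p.1.2)).Nodup := by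
  induction l with
  | nil => simp
  | cons p l ih =>
      simp only [List.map_cons, List.nodup_cons] at h
      by_cases hg : p.1.1 = g
      · have hgb : (p.1.1 == g) = true := by simpa using hg
        rw [List.filter_cons, if_pos hgb, List.map_cons, List.nodup_cons]
        refine ⟨?_, ih h.2⟩
        intro hmem
        obtain ⟨q, hq, hq2⟩ := List.mem_map.mp hmem
        have hqf : (q.1.1 == g) = true := (List.mem_filter.mp hq).2
        have hq1 : q.1 = p.1 := Prod.ext (by rw [beq_iff_eq.mp hqf, hg]) hq2
        exact h.1 (hq1 ▸ List.mem_map_of_mem (List.mem_filter.mp hq).1)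
      · have hgb : ¬ ((p.1.1 == g) = true) := by simpa using hg
        rw [List.filter_cons, if_neg hgb]
        exact ih h.2

theorem pvPass2_eq (n : Int) (flat : PySem.Dict (Int × Int) (Int × Int))
    (hnd : flat.keys.Nodup) (hk : ∀ k ∈ flat.keys, 0 ≤ k.1 ∧ k.1 < n) :
    pvPass2 n flat = pvMkform n flat := by
  have hl : ∀ p ∈ flat.items, 0 ≤ p.1.1 ∧ p.1.1 < n := by
    intro p hp
    exact hk p.1 (List.mem_map_of_mem hp)
  unfold pvPass2
  rw [pvSeed_eq]
  unfold pvMkform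
  rw [pvPass2_gen n flat.items (fun g => pvInnerFor g PySem.Dict.empty) hl]
  congr 1
  apply List.map_congr_left
  intro g _
  refine congrArg (fun d => (g, d)) ?_
  rw [pvFoldIf]
  have h0 : pvInnerFor g PySem.Dict.empty = PySem.Dict.empty := rfl
  rw [h0]
  apply PySem.Dict.ext
  rw [PySem.Dict.items_foldl_insert_fresh]
  · simp [pvInnerFor, PySem.Dict.empty]
  · intro a _
    exact PySem.Dict.contains_empty _
  · exact pvNodupFiltered g flat.items hnd

theorem pv_events_ok (aob : List (Int × List (Int × Int × Int × Int))) (gpb : List (Int × Int))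
    (stable_idxs : List Int) (n : Int)
    (hpre : Pre_compute_conflicting_groups stable_idxs aob n gpb) :
    ∀ e ∈ pvEvents (PySem.Dict.ofList aob) (PySem.Dict.ofList gpb) stable_idxs, 0 ≤ e.1 ∧ e.1 < n := by
  intro e he
  unfold Pre_compute_conflicting_groups at hpre
  unfold pvEvents at he
  rw [List.mem_flatMap] at he
  obtain ⟨b1, hb1, he⟩ := he
  rw [List.mem_flatMap] at he
  obtain ⟨r, hr, he⟩ := he
  by_cases hc : b1 < r.1 ∧
      (PySem.Dict.ofList gpb).getD b1 0 ≠ (PySem.Dict.ofList gpb).getD r.1 0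
  · rw [if_pos hc] at he
    have h1 := List.all_eq_true.mp hpre b1 hb1
    simp only [Bool.and_eq_true, List.all_eq_true] at h1
    have h2 := h1.2 r hr
    simp only [Bool.or_eq_true, Bool.and_eq_true, Bool.not_eq_true', decide_eq_true_eq,
      decide_eq_false_iff_not] at h2
    rcases h2 with h2 | h2
    · exact absurd hc.1 h2
    obtain ⟨-, hd⟩ := h2
    rcases hd with hd | hd
    · exact absurd hd hc.2
    · obtain ⟨⟨⟨ha1, ha2⟩, ha3⟩, ha4⟩ := hd
      simp only [List.mem_cons, List.not_mem_nil, or_false] at he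
      rcases he with he | he <;> subst he
      · exact ⟨ha1, ha2⟩
      · exact ⟨ha3, ha4⟩
  · rw [if_neg hc] at he
    exact absurd he (List.not_mem_nil)

theorem pvPortA_eq (stable_idxs : List Int) (aob : List (Int × List (Int × Int × Int × Int)))
    (n : Int) (gpb : List (Int × Int)) :
    compute_conflicting_groups stable_idxs aob n gpb
      = ((pvEvents (PySem.Dict.ofList aob) (PySem.Dict.ofList gpb) stable_idxs).foldl pvStepA
          (pvSeed n)).items.map (fun p => (p.1, p.2.items.map (fun q => (q.1, q.2.items)))) := by
  have h1 : compute_conflicting_groups stable_idxs aob n gpb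
      = ((PySem.List.pyRange 0 (PySem.List.len stable_idxs) 1).foldl
          (fun c offset1 => pvInnerA (PySem.Dict.ofList aob) (PySem.Dict.ofList gpb) c
            (PySem.List.pyGetD stable_idxs offset1 0)) (pvSeed n)).items.map
          (fun p => (p.1, p.2.items.map (fun q => (q.1, q.2.items)))) := rfl
  rw [h1, PySem.List.foldl_pyRange_pyGetD stable_idxs 0
      (pvInnerA (PySem.Dict.ofList aob) (PySem.Dict.ofList gpb)) (pvSeed n) (le_refl 0)]
  simp only [Int.toNat_zero, List.drop_zero]
  have hfa : stable_idxs.foldl (pvInnerA (PySem.Dict.ofList aob) (PySem.Dict.ofList gpb)) (pvSeed n)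
      = (pvEvents (PySem.Dict.ofList aob) (PySem.Dict.ofList gpb) stable_idxs).foldl pvStepA
          (pvSeed n) := by
    unfold pvEvents
    rw [pv_foldl_flatMap]
    congr 1
    funext c b1
    exact pvInnerA_eq _ _ c b1
  rw [hfa]

theorem pvPortB_eq (stable_idxs : List Int) (aob : List (Int × List (Int × Int × Int × Int)))
    (n : Int) (gpb : List (Int × Int)) :
    compute_conflicting_groups_alt stable_idxs aob n gpb
      = (pvPass2 n ((pvEvents (PySem.Dict.ofList aob) (PySem.Dict.ofList gpb) stable_idxs).foldl
          pvStepB PySem.Dict.empty)).items.map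
          (fun p => (p.1, p.2.items.map (fun q => (q.1, q.2.items)))) := by
  have h1 : compute_conflicting_groups_alt stable_idxs aob n gpb
      = ((pvKeys (stable_idxs.foldl (pvCollect (PySem.Dict.ofList aob) (PySem.Dict.ofList gpb)) [])).foldl
          (fun c k =>
            c.insert k.1 ((c.getD k.1 PySem.Dict.empty).insert k.2
              (PySem.Dict.ofList
                [("matched", (pvPairTotals (stable_idxs.foldl (pvCollect (PySem.Dict.ofList aob) (PySem.Dict.ofList gpb)) []) k).1),
                 ("unmatched", (pvPairTotals (stable_idxs.foldl (pvCollect (PySem.Dict.ofList aob) (PySem.Dict.ofList gpb)) []) k).2)])))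
          (pvSeed n)).items.map (fun p => (p.1, p.2.items.map (fun q => (q.1, q.2.items)))) := rfl
  rw [h1, pvEventsB_eq]
  set E := pvEvents (PySem.Dict.ofList aob) (PySem.Dict.ofList gpb) stable_idxs with hE
  congr 1
  unfold pvPass2
  rw [pvFlatItems, List.foldl_map]

-- ===== VERDICT (by name: the statement is the Claim_ definition above) =====
theorem compute_conflicting_groups_spec : Claim_equal_compute_conflicting_groups := by
  intro stable_idxs aob n gpb _ hpre
  unfold Spec_compute_conflicting_groups
  rw [pvPortA_eq, pvPortB_eq]
  have hOK := pv_events_ok aob gpb stable_idxs n hpre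
  have hflatfn : pvStepB = (fun (d : PySem.Dict (Int × Int) (Int × Int)) (e : Int × Int × Int × Int) =>
      d.insert (e.1, e.2.1)
        ((d.getD (e.1, e.2.1) (0, 0)).1 + e.2.2.1, (d.getD (e.1, e.2.1) (0, 0)).2 + e.2.2.2)) := rfl
  have hnd : (((pvEvents (PySem.Dict.ofList aob) (PySem.Dict.ofList gpb) stable_idxs).foldl pvStepB
      PySem.Dict.empty)).keys.Nodup := by
    rw [hflatfn]
    exact PySem.Dict.nodup_keys_foldl_insert_key _ (fun (e : Int × Int × Int × Int) => (e.1, e.2.1))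
      _ _ PySem.Dict.nodup_keys_empty
  have hkeys : ∀ k ∈ (((pvEvents (PySem.Dict.ofList aob) (PySem.Dict.ofList gpb) stable_idxs).foldl
      pvStepB PySem.Dict.empty)).keys, 0 ≤ k.1 ∧ k.1 < n := by
    intro k hkmem
    rw [hflatfn, PySem.Dict.keys_foldl_insert_key] at hkmem
    simp only [PySem.Dict.keys_empty, PySem.Set.update_nil_left] at hkmem
    obtain ⟨e, he, rfl⟩ := List.mem_map.mp ((PySem.Set.mem_ofList _ _).mp hkmem)
    exact hOK e he
  rw [pvPass2_eq n _ hnd hkeys, pvSeed_eq, pvMain n _ PySem.Dict.empty hOK]
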